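-- pv_equiv track=rewrite | github.com/hanrgy/docs-bot | utils/embeddings.py | calculate_overlap_sentences
-- ===== SOURCE A (Python) =====
-- from typing import List, Dict, Tuple, Optional
--
-- def calculate_overlap_sentences(overlap_text: str, previous_sentences: List[str]) -> int:
--     """Calculate how many sentences the overlap covers"""
--     if not overlap_text or not previous_sentences:
--         return 0
--
--     overlap_words = set(overlap_text.lower().split())
--
--     for i in range(len(previous_sentences) - 1, -1, -1):
--         sentence_words = set(previous_sentences[i].lower().split())
--         if overlap_words.intersection(sentence_words):
--             return len(previous_sentences) - i
--
--     return 0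
-- ===== SOURCE B (Python) =====
-- from typing import List
--
--
-- def calculate_overlap_sentences(overlap_text: str, previous_sentences: List[str]) -> int:
--     """Calculate how many sentences the overlap covers"""
--     if not overlap_text or not previous_sentences:
--         return 0
--
--     last_index = {}
--     for i, sentence in enumerate(previous_sentences):
--         for word in sentence.lower().split():
--             last_index[word] = i
--
--     best = max((last_index.get(word, -1) for word in overlap_text.lower().split()),
--                default=-1)
--     return len(previous_sentences) - best if best >= 0 else 0
-- ===== Notes on version B (the rewrite author's own statement) =====
-- stated objective: alternative
-- what changed: Replaces A's backward index loop with a per-sentence set intersection by one forward pass building an inverted index (word -> last sentence index) plus a single max-lookup pass over the overlap words.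
import Mathlib
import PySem

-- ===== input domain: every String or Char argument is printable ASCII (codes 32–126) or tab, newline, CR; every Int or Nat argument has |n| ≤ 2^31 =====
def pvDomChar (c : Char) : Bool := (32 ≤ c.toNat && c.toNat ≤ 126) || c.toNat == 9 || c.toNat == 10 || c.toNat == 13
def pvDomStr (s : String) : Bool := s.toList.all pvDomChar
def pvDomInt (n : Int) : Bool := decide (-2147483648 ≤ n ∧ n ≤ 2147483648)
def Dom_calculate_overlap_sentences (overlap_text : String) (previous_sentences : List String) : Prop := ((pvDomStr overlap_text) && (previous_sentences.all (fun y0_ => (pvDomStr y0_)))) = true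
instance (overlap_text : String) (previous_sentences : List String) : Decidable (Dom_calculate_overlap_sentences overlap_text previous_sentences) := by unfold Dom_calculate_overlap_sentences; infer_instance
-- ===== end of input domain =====

-- B replaces A's backward scan with per-sentence set intersection by a single forward
-- pass building a word -> last-index dict and one max-lookup pass (objective: alternative).

-- ===== PORT A =====
-- A: backward loop over indices, first sentence (from the end) whose word set
-- intersects the overlap word set decides the result.
def calculate_overlap_sentences (overlap_text : String) (previous_sentences : List String) : Int :=
  if overlap_text = "" ∨ previous_sentences = [] then 0
  else
    let overlap_words := PySem.Set.ofList (PySem.Str.split₀ (PySem.Str.lower overlap_text))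
    let n : Int := previous_sentences.length
    let r := (PySem.List.pyRange (n - 1) (-1) (-1)).foldl
      (fun (acc : Option Int) i =>
        match acc with
        | some r => some r
        | none =>
          let sentence_words := PySem.Set.ofList
            (PySem.Str.split₀ (PySem.Str.lower (PySem.List.pyGetD previous_sentences i "")))
          if PySem.Set.inter overlap_words sentence_words ≠ [] then some (n - i) else none)
      none
    r.getD 0

-- ===== PORT B =====
def calculate_overlap_sentences_alt (overlap_text : String) (previous_sentences : List String) : Int :=
  if overlap_text = "" ∨ previous_sentences = [] then 0
  else
    let last_index : PySem.Dict String Int :=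
      (PySem.List.enumerate previous_sentences 0).foldl
        (fun d p =>
          (PySem.Str.split₀ (PySem.Str.lower p.2)).foldl (fun d w => d.insert w p.1) d)
        PySem.Dict.empty
    let best : Int :=
      (PySem.Str.split₀ (PySem.Str.lower overlap_text)).foldl
        (fun b w => max b (last_index.getD w (-1))) (-1)
    if best ≥ 0 then (previous_sentences.length : Int) - best else 0

-- ===== PRECONDITION & SPEC =====
def Spec_calculate_overlap_sentences (overlap_text : String) (previous_sentences : List String) (out : Int) : Prop := out = calculate_overlap_sentences_alt overlap_text previous_sentences
instance (overlap_text : String) (previous_sentences : List String) (out : Int) : Decidable (Spec_calculate_overlap_sentences overlap_text previous_sentences out) := by unfold Spec_calculate_overlap_sentences; infer_instance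

-- ===== CLAIM (what is proved, stated in full; the proofs are below) =====
def Claim_equal_calculate_overlap_sentences : Prop := ∀ (overlap_text : String) (previous_sentences : List String), Dom_calculate_overlap_sentences overlap_text previous_sentences → Spec_calculate_overlap_sentences overlap_text previous_sentences (calculate_overlap_sentences overlap_text previous_sentences)

-- ===== LEMMAS AND PROOFS =====

-- words of a sentence, lowercased
def pvW (s : String) : List String := PySem.Str.split₀ (PySem.Str.lower s)

-- last index (from the front) of a sentence containing w, over the REVERSED list; -1 if none
def pvLastIdxRev (w : String) : List String → Int
  | [] => -1
  | s :: rest => if w ∈ pvW s then (rest.length : Int) else pvLastIdxRev w rest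

def pvLastIdx (w : String) (ss : List String) : Int := pvLastIdxRev w ss.reverse

def pvBest (O : List String) (ss : List String) : Int :=
  O.foldl (fun b w => max b (pvLastIdx w ss)) (-1)

theorem pvLastIdxRev_lt (w : String) (l : List String) : pvLastIdxRev w l < l.length := by
  induction l with
  | nil => simp [pvLastIdxRev]
  | cons s rest ih =>
    simp only [pvLastIdxRev, List.length_cons]
    split <;> push_cast <;> omega

theorem pvLastIdx_lt (w : String) (ss : List String) : pvLastIdx w ss < ss.length := by
  have := pvLastIdxRev_lt w ss.reverse
  simpa [pvLastIdx] using this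

theorem pvLastIdx_snoc (w : String) (ss : List String) (t : String) :
    pvLastIdx w (ss ++ [t]) = if w ∈ pvW t then (ss.length : Int) else pvLastIdx w ss := by
  simp [pvLastIdx, pvLastIdxRev]

theorem pv_foldl_max_ge_init (f : String → Int) (O : List String) (b : Int) :
    b ≤ O.foldl (fun b w => max b (f w)) b := by
  induction O generalizing b with
  | nil => simp
  | cons w rest ih =>
    simp only [List.foldl_cons]
    exact le_trans (le_max_left _ _) (ih _)

theorem pv_foldl_max_ge_of_mem (f : String → Int) (O : List String) :
    ∀ (b : Int) (w : String), w ∈ O → f w ≤ O.foldl (fun b w => max b (f w)) b := by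
  induction O with
  | nil => intro b w hw; simp at hw
  | cons x rest ih =>
    intro b w hw
    simp only [List.foldl_cons]
    rcases List.mem_cons.mp hw with h | h
    · subst h; exact le_trans (le_max_right _ _) (pv_foldl_max_ge_init f rest _)
    · exact ih _ w h
theorem pv_foldl_max_le (f : String → Int) (O : List String) (b c : Int)
    (hb : b ≤ c) (hf : ∀ w ∈ O, f w ≤ c) :
    O.foldl (fun b w => max b (f w)) b ≤ c := by
  induction O generalizing b with
  | nil => simpa
  | cons x rest ih =>
    simp only [List.foldl_cons]
    exact ih _ (max_le hb (hf x (by simp))) (fun w hw => hf w (by simp [hw]))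

theorem pvBest_neg_one (O : List String) (ss : List String) (h : ∀ w ∈ O, pvLastIdx w ss = -1) :
    pvBest O ss = -1 := by
  unfold pvBest
  apply le_antisymm
  · exact pv_foldl_max_le _ _ _ _ le_rfl (fun w hw => le_of_eq (h w hw))
  · exact pv_foldl_max_ge_init _ _ _

theorem pvBest_nil (O : List String) : pvBest O [] = -1 :=
  pvBest_neg_one O [] (fun w _ => rfl)

theorem pvBest_snoc (O : List String) (ss : List String) (t : String) :
    pvBest O (ss ++ [t]) =
      if ∃ w ∈ O, w ∈ pvW t then (ss.length : Int) else pvBest O ss := by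
  unfold pvBest
  have hcong : (fun (b : Int) (w : String) => max b (pvLastIdx w (ss ++ [t]))) =
      (fun (b : Int) (w : String) =>
        max b (if w ∈ pvW t then (ss.length : Int) else pvLastIdx w ss)) := by
    funext b w; rw [pvLastIdx_snoc]
  rw [hcong]
  split
  · rename_i hex
    obtain ⟨w, hwO, hwt⟩ := hex
    apply le_antisymm
    · apply pv_foldl_max_le _ _ _ _ (by omega)
      intro x _
      split
      · exact le_rfl
      · exact le_of_lt (pvLastIdx_lt x ss)
    · have := pv_foldl_max_ge_of_mem
        (fun w => if w ∈ pvW t then (ss.length : Int) else pvLastIdx w ss) O (-1) w hwO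
      simpa [hwt] using this
  · rename_i hnex
    apply PySem.List.foldl_congr_mem
    intro b w hw
    have : w ∉ pvW t := fun h => hnex ⟨w, hw, h⟩
    simp [this]

-- the dict built by B maps w to the last index of a sentence containing w
theorem pv_insert_many_getD (ws : List String) (v : Int) (d : PySem.Dict String Int) (q : String) :
    ((ws.foldl (fun d w => d.insert w v) d).getD q (-1)) =
      if q ∈ ws then v else d.getD q (-1) := by
  induction ws generalizing d with
  | nil => simp
  | cons w rest ih =>
    simp only [List.foldl_cons, ih, PySem.Dict.getD_insert, List.mem_cons]
    by_cases h1 : q ∈ rest <;> by_cases h2 : q = w <;> simp [h1, h2]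

def pvDictOf (ss : List String) : PySem.Dict String Int :=
  (PySem.List.enumerate ss 0).foldl
    (fun d p => (pvW p.2).foldl (fun d w => d.insert w p.1) d) PySem.Dict.empty

theorem pvDictOf_getD (ss : List String) (q : String) :
    (pvDictOf ss).getD q (-1) = pvLastIdx q ss := by
  induction ss using List.reverseRecOn with
  | nil => simp [pvDictOf, pvLastIdx, pvLastIdxRev, PySem.List.enumerate]
  | append_singleton ss t ih =>
    unfold pvDictOf
    rw [PySem.List.enumerate_append, List.foldl_append]
    simp only [PySem.List.enumerate, List.foldl_cons, List.foldl_nil]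
    rw [pv_insert_many_getD, pvLastIdx_snoc]
    unfold pvDictOf at ih
    simp [ih]

-- once A's loop accumulator is `some r`, it stays `some r`
theorem pv_foldl_some (f : Int → Option Int) (l : List Int) (r : Int) :
    (l.foldl (fun (acc : Option Int) i =>
      match acc with
      | some r => some r
      | none => f i) (some r)) = some r := by
  induction l with
  | nil => rfl
  | cons i rest ih => simpa using ih

-- A's backward scan, characterised by pvBest
theorem pv_scan_eq (O : List String) (ss : List String) (c : Int) :
    ((PySem.List.pyRange ((ss.length : Int) - 1) (-1) (-1)).foldl
      (fun (acc : Option Int) i =>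
        match acc with
        | some r => some r
        | none =>
          if ∃ w ∈ O, w ∈ pvW (PySem.List.pyGetD ss i "") then some (c - i) else none)
      none)
    = if pvBest O ss ≥ 0 then some (c - pvBest O ss) else none := by
  induction ss using List.reverseRecOn with
  | nil =>
    rw [PySem.List.pyRange_neg_one_eq_nil (by simp)]
    simp [pvBest_nil]
  | append_singleton ss t ih =>
    have hlen : ((ss ++ [t]).length : Int) - 1 = (ss.length : Int) := by
      simp
    rw [hlen, PySem.List.pyRange_neg_one_cons (by omega)]
    simp only [List.foldl_cons]
    have hget : PySem.List.pyGetD (ss ++ [t]) (ss.length : Int) "" = t := by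
      rw [PySem.List.pyGetD_natCast]
      simp
    rw [pvBest_snoc]
    by_cases hex : ∃ w ∈ O, w ∈ pvW t
    · have h0 : (0 : Int) ≤ (ss.length : Int) := by omega
      simp only [hget, hex, pv_foldl_some, if_pos]
      simp [h0]
    · simp only [hget, hex, if_false]
      rw [PySem.List.foldl_congr_mem _ _ (fun (acc : Option Int) i =>
          match acc with
          | some r => some r
          | none =>
            if ∃ w ∈ O, w ∈ pvW (PySem.List.pyGetD ss i "") then some (c - i) else none) _ ?_]
      · simpa [hex] using ih
      · intro acc i hi
        have hmem := (PySem.List.mem_pyRange_neg_one).mp hi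
        have h0 : 0 ≤ i := by omega
        have h1 : i < (ss.length : Int) := by omega
        have : PySem.List.pyGetD (ss ++ [t]) i "" = PySem.List.pyGetD ss i "" := by
          rw [PySem.List.pyGetD_eq_getElem _ _ h0 (by simp; omega),
              PySem.List.pyGetD_eq_getElem _ _ h0 (by simpa using h1)]
          exact List.getElem_append_left _
        rw [this]

theorem pv_inter_ne_iff (O : List String) (s : String) :
    (PySem.Set.inter (PySem.Set.ofList O) (PySem.Set.ofList (pvW s)) ≠ []) ↔
      ∃ w ∈ O, w ∈ pvW s := by
  rw [← List.isEmpty_eq_false_iff, List.isEmpty_eq_false_iff_exists_mem]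
  constructor
  · rintro ⟨w, hw⟩
    have := (PySem.Set.mem_inter _ _ _).mp hw
    exact ⟨w, (PySem.Set.mem_ofList _ _).mp this.1, (PySem.Set.mem_ofList _ _).mp this.2⟩
  · rintro ⟨w, h1, h2⟩
    exact ⟨w, (PySem.Set.mem_inter _ _ _).mpr ⟨(PySem.Set.mem_ofList _ _).mpr h1, (PySem.Set.mem_ofList _ _).mpr h2⟩⟩

-- ===== VERDICT (by name: the statement is the Claim_ definition above) =====
theorem calculate_overlap_sentences_spec : Claim_equal_calculate_overlap_sentences := by
  intro ot ss _
  unfold Spec_calculate_overlap_sentences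
  unfold calculate_overlap_sentences calculate_overlap_sentences_alt
  by_cases hgd : ot = "" ∨ ss = []
  · simp [hgd]
  · simp only [hgd, if_false]
    set O := PySem.Str.split₀ (PySem.Str.lower ot) with hO
    -- rewrite A's intersection test into the ∃-form and apply the scan lemma
    have hstep :
        ((PySem.List.pyRange ((ss.length : Int) - 1) (-1) (-1)).foldl
          (fun (acc : Option Int) i =>
            match acc with
            | some r => some r
            | none =>
              if PySem.Set.inter (PySem.Set.ofList O)
                  (PySem.Set.ofList (PySem.Str.split₀ (PySem.Str.lower
                    (PySem.List.pyGetD ss i "")))) ≠ [] then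
                some ((ss.length : Int) - i) else none)
          none)
        = if pvBest O ss ≥ 0 then some ((ss.length : Int) - pvBest O ss) else none := by
      rw [PySem.List.foldl_congr_mem _ _ (fun (acc : Option Int) i =>
          match acc with
          | some r => some r
          | none =>
            if ∃ w ∈ O, w ∈ pvW (PySem.List.pyGetD ss i "") then some ((ss.length : Int) - i)
            else none) _ ?_]
      · exact pv_scan_eq O ss ((ss.length : Int))
      · intro acc i _
        cases acc with
        | some r => rfl
        | none =>
          simp only []
          congr 1
          rw [eq_iff_iff]
          exact pv_inter_ne_iff O (PySem.List.pyGetD ss i "")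
    rw [hstep]
    -- B's side: dict lookups are pvLastIdx, hence B's best is pvBest, on the set-or-list of words
    have hdict :
        (O.foldl (fun b w => max b ((pvDictOf ss).getD w (-1))) (-1)) = pvBest O ss := by
      unfold pvBest
      apply PySem.List.foldl_congr_mem
      intro b w _
      rw [pvDictOf_getD]
    rw [show ((PySem.List.enumerate ss 0).foldl
        (fun d p => (PySem.Str.split₀ (PySem.Str.lower p.2)).foldl
          (fun d w => d.insert w p.1) d) PySem.Dict.empty) = pvDictOf ss from rfl]
    rw [hdict]
    by_cases hb : pvBest O ss ≥ 0 <;> simp [hb]
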